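-- pv_equiv track=rewrite | github.com/12TheHangedMan/AutoSkillGenerator | utility.py | split_into_tiers
-- ===== SOURCE A (Python) =====
-- def split_into_tiers(levels, total_tiers):
--     n = len(levels)
--     base_size = n // total_tiers
--     remainder = n % total_tiers
--
--     tiers = []
--     start = 0
--
--     for i in range(total_tiers):
--         extra = 1 if i < remainder else 0
--         end = start + base_size + extra
--         tiers.append(levels[start:end])
--         start = end
--
--     return tiers
-- ===== SOURCE B (Python) =====
-- def split_into_tiers(levels, total_tiers):
--     # Peel tiers off the END of a shrinking working list: with extras
--     # front-loaded, the last of t remaining tiers always holds exactly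
--     # len(rest) // t elements.  Build the answer back-to-front and reverse.
--     rest = list(levels)
--     out = []
--     t = total_tiers
--     while t > 0:
--         cut = len(rest) - len(rest) // t
--         out.append(rest[cut:])
--         del rest[cut:]
--         t -= 1
--     out.reverse()
--     return out
-- ===== Notes on version B (the rewrite author's own statement) =====
-- stated objective: alternative
-- what changed: A walks tiers front-to-back with a precomputed base_size/remainder and a running start slicing the immutable input; B repeatedly detaches the LAST tier (len(rest)//tiers_left elements) from the end of a shrinking working copy, appends it, and reverses the collected list at the end, with no remainder, no extra-element test, and no running start index.
-- crash fix: On total_tiers == 0 A raises ZeroDivisionError (n // 0); B naturally returns [] there (its while-loop never runs for non-positive tier counts). — e.g. on split_into_tiers([1, 2], 0): A raises ZeroDivisionError, B returns []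
import Mathlib
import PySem

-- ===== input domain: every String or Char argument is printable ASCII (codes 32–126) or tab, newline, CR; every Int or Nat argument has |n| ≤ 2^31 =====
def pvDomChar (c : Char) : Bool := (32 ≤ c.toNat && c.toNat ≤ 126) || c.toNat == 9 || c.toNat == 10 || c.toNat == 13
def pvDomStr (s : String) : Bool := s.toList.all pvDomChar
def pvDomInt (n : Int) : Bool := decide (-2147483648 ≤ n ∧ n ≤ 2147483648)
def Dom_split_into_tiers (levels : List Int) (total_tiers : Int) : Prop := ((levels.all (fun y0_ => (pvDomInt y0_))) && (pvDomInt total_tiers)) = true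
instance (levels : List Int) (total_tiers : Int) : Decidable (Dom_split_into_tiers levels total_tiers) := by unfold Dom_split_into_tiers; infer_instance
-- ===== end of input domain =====

-- B replaces A's forward base-size/remainder loop by a backward destructive peel: it detaches the
-- last tier (len(rest)//tiers_left elements) from a shrinking working copy and reverses at the end
-- (objective: alternative decomposition, same cost); B returns [] where A divides by zero (total_tiers = 0).


-- ===== PORT A =====
-- body of A's for-loop; state = (tiers, start)
def stepA (levels : List Int) (base_size remainder : Int)
    (st : List (List Int) × Int) (i : Int) : List (List Int) × Int :=
  let extra : Int := if i < remainder then 1 else 0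
  let e := st.2 + base_size + extra
  (st.1 ++ [PySem.List.slice levels (some st.2) (some e)], e)

def split_into_tiers (levels : List Int) (total_tiers : Int) : List (List Int) :=
  let n : Int := levels.length
  let base_size := PySem.Int.floordiv n total_tiers
  let remainder := PySem.Int.mod n total_tiers
  ((PySem.List.pyRange 0 total_tiers 1).foldl (stepA levels base_size remainder) ([], 0)).1

-- ===== PORT B =====
-- B's while-loop: state = (rest, out, t); each pass detaches the last tier from `rest`
-- (rest[cut:] = drop cut, del rest[cut:] = take cut) and counts t down.
def loopB : List Int → List (List Int) → ℕ → List (List Int)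
  | _, out, 0 => out
  | rest, out, (t+1) =>
      let cut := rest.length - rest.length / (t+1)
      loopB (rest.take cut) (out ++ [rest.drop cut]) t

def split_into_tiers_alt (levels : List Int) (total_tiers : Int) : List (List Int) :=
  (loopB levels [] total_tiers.toNat).reverse

-- ===== PRECONDITION & SPEC =====
-- Pre_ excludes exactly total_tiers = 0, where A raises ZeroDivisionError (n // 0).
def Pre_split_into_tiers (levels : List Int) (total_tiers : Int) : Prop := total_tiers ≠ 0
instance (levels : List Int) (total_tiers : Int) : Decidable (Pre_split_into_tiers levels total_tiers) := by unfold Pre_split_into_tiers; infer_instance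
def pvWitness_split_into_tiers : List Int × Int := ([3, 1, 2, 7, 5], 3)

-- On total_tiers = 0 A raises ZeroDivisionError; B returns [].
def Raises_split_into_tiers (levels : List Int) (total_tiers : Int) : Prop := total_tiers = 0
instance (levels : List Int) (total_tiers : Int) : Decidable (Raises_split_into_tiers levels total_tiers) := by unfold Raises_split_into_tiers; infer_instance
def pvRaiseWitness_split_into_tiers : List Int × Int := ([1, 2], 0)
def pvRaiseWitnessOut_split_into_tiers : List (List Int) := []

def Spec_split_into_tiers (levels : List Int) (total_tiers : Int) (out : List (List Int)) : Prop := out = split_into_tiers_alt levels total_tiers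
instance (levels : List Int) (total_tiers : Int) (out : List (List Int)) : Decidable (Spec_split_into_tiers levels total_tiers out) := by unfold Spec_split_into_tiers; infer_instance

-- ===== CLAIM (what is proved, stated in full; the proofs are below) =====
def Claim_equal_split_into_tiers : Prop := ∀ (levels : List Int) (total_tiers : Int), Dom_split_into_tiers levels total_tiers → Pre_split_into_tiers levels total_tiers → Spec_split_into_tiers levels total_tiers (split_into_tiers levels total_tiers)
def Claim_raises_split_into_tiers : Prop := (∀ (levels : List Int) (total_tiers : Int), Dom_split_into_tiers levels total_tiers → Raises_split_into_tiers levels total_tiers → ¬ Pre_split_into_tiers levels total_tiers) ∧ (Dom_split_into_tiers (pvRaiseWitness_split_into_tiers.1) (pvRaiseWitness_split_into_tiers.2) ∧ Raises_split_into_tiers (pvRaiseWitness_split_into_tiers.1) (pvRaiseWitness_split_into_tiers.2) ∧ split_into_tiers_alt (pvRaiseWitness_split_into_tiers.1) (pvRaiseWitness_split_into_tiers.2) = pvRaiseWitnessOut_split_into_tiers)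

-- ===== LEMMAS AND PROOFS =====

-- Closed-form reference: tier i of a balanced split of `levels` into t tiers runs from
-- tierBound n t i to tierBound n t (i+1); both ports are proved equal to it.
def tierBound (n t i : ℕ) : ℕ := i * (n / t) + min i (n % t)

def tiersRef (levels : List Int) (t : ℕ) : List (List Int) :=
  (List.range t).map (fun i =>
    (levels.drop (tierBound levels.length t i)).take
      (tierBound levels.length t (i+1) - tierBound levels.length t i))

lemma foldA_closed (levels : List Int) (q r : ℕ) (m : ℕ) :
    ((List.range m).map (fun k => (Int.ofNat k))).foldl
        (stepA levels (q : Int) (r : Int)) ([], 0)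
      = ((List.range m).map (fun i =>
          (levels.drop (i * q + min i r)).take ((i+1) * q + min (i+1) r - (i * q + min i r))),
         ((m * q + min m r : ℕ) : Int)) := by
  induction m with
  | zero => simp
  | succ m ih =>
    rw [List.range_succ, List.map_append, List.foldl_append, ih, List.map_append]
    simp only [List.map_cons, List.map_nil, List.foldl_cons, List.foldl_nil, stepA]
    have hm : (m+1) * q = m * q + q := by ring
    have h2 : ((m * q + min m r : ℕ) : Int) + (q : Int) + (if (Int.ofNat m) < (r : Int) then (1:Int) else 0)
        = (((m+1) * q + min (m+1) r : ℕ) : Int) := by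
      simp only [Int.ofNat_eq_natCast, hm]
      split_ifs with h <;> push_cast at h ⊢ <;> omega
    rw [h2, PySem.List.slice_natCast]

lemma A_eq_ref (levels : List Int) (t : ℕ) :
    split_into_tiers levels (t : Int) = tiersRef levels t := by
  have hrange : PySem.List.pyRange 0 (t : Int) 1 = (List.range t).map (fun k => (Int.ofNat k)) := by
    rw [PySem.List.pyRange_one]; simp [Int.ofNat_eq_natCast]
  simp only [split_into_tiers, PySem.Int.floordiv_natCast, PySem.Int.mod_natCast, hrange]
  rw [foldA_closed]
  rfl

-- Peeling the last tier: the balanced split of `rest` into c+1 tiers is the balanced split of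
-- the first cut = |rest| - |rest|/(c+1) elements into c tiers, followed by the last |rest|/(c+1).
lemma div_fact (c q r : ℕ) (h : r < c+1) :
    ((c+1)*q + r)/(c+1) = q ∧ ((c+1)*q + r) % (c+1) = r := by
  constructor
  · rw [Nat.mul_add_div (Nat.succ_pos c), Nat.div_eq_of_lt h]
    omega
  · rw [Nat.mul_add_mod, Nat.mod_eq_of_lt h]


lemma tierBound_peel (c q r : ℕ) (hr : r < c+1) :
    ∀ i, i ≤ c → tierBound (c*q + r) c i = tierBound ((c+1)*q + r) (c+1) i := by
  intro i hi
  obtain ⟨hd, hmo⟩ := div_fact c q r hr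
  unfold tierBound
  rw [hd, hmo]
  rcases Nat.eq_zero_or_pos c with hc0 | hcpos
  · subst hc0
    have hi0 : i = 0 := by omega
    subst hi0; simp
  · rcases eq_or_lt_of_le (Nat.lt_succ_iff.mp hr) with hre | hrlt
    · subst hre
      have h1 : r*q + r = r*(q+1) := by ring
      rw [h1, Nat.mul_div_cancel_left _ (by omega : 0 < r), Nat.mul_mod_right]
      have h4 : i*(q+1) = i*q + i := by ring
      have h5 : min i r = i := by omega
      omega
    · have hd2 : (c*q + r)/c = q := by
        rw [Nat.mul_add_div hcpos, Nat.div_eq_of_lt hrlt]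
        omega
      have hm2 : (c*q + r)%c = r := by
        rw [Nat.mul_add_mod, Nat.mod_eq_of_lt hrlt]
      rw [hd2, hm2]

lemma tierBound_peel_le (c q r : ℕ) (hr : r < c+1) :
    ∀ i, i ≤ c → tierBound ((c+1)*q + r) (c+1) i ≤ c*q + r := by
  intro i hi
  obtain ⟨hd, hmo⟩ := div_fact c q r hr
  unfold tierBound
  rw [hd, hmo]
  have hmin : min i r ≤ r := Nat.min_le_right _ _
  have h1 : i*q ≤ c*q := Nat.mul_le_mul_right _ hi
  omega

lemma tierBound_mono (n t i : ℕ) : tierBound n t i ≤ tierBound n t (i+1) := by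
  unfold tierBound
  have h1 : i*(n/t) ≤ (i+1)*(n/t) := Nat.mul_le_mul_right _ (by omega)
  have h2 : min i (n%t) ≤ min (i+1) (n%t) := by omega
  omega

-- Peeling the last tier: the balanced split of `rest` into c+1 tiers is the balanced split of
-- the first cut = |rest| - |rest|/(c+1) elements into c tiers, followed by the last |rest|/(c+1).
lemma tiersRef_succ (rest : List Int) (c : ℕ) :
    tiersRef rest (c+1)
      = tiersRef (rest.take (rest.length - rest.length / (c+1))) c
          ++ [rest.drop (rest.length - rest.length / (c+1))] := by
  obtain ⟨q, r, hr, hqr⟩ : ∃ q r, r < c+1 ∧ rest.length = (c+1)*q + r :=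
    ⟨_, _, Nat.mod_lt _ (Nat.succ_pos c), (Nat.div_add_mod _ _).symm⟩
  obtain ⟨hd, hmo⟩ := div_fact c q r hr
  have hexp : (c+1)*q = c*q + q := by ring
  have hcut : rest.length - rest.length/(c+1) = c*q + r := by
    rw [hqr, hd]; omega
  rw [hcut]
  have hlen : (rest.take (c*q + r)).length = c*q + r := by
    rw [List.length_take]; omega
  unfold tiersRef
  rw [hlen, hqr, List.range_succ, List.map_append, List.map_cons, List.map_nil]
  congr 1
  · apply List.map_congr_left
    intro i hi
    have hic : i < c := List.mem_range.mp hi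
    rw [tierBound_peel c q r hr i (le_of_lt hic), tierBound_peel c q r hr (i+1) hic,
      List.drop_take, List.take_take]
    congr 1
    have h1 := tierBound_peel_le c q r hr (i+1) hic
    have h2 := tierBound_mono ((c+1)*q + r) (c+1) i
    omega
  · have hBc : tierBound ((c+1)*q + r) (c+1) c = c*q + r := by
      unfold tierBound
      rw [hd, hmo]
      have h3 : min c r = r := by omega
      omega
    rw [hBc]
    congr 1
    apply List.take_of_length_le
    rw [List.length_drop, hqr]
    unfold tierBound
    rw [hd, hmo]
    have h2 : min (c+1) r = r := by omega
    omega

-- loop invariant of B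
lemma loopB_eq (c : ℕ) : ∀ (rest : List Int) (out : List (List Int)),
    loopB rest out c = out ++ (tiersRef rest c).reverse := by
  induction c with
  | zero => intro rest out; simp [loopB, tiersRef]
  | succ c ih =>
    intro rest out
    rw [loopB, ih, tiersRef_succ]
    simp

lemma B_eq_ref (levels : List Int) (t : ℕ) :
    split_into_tiers_alt levels (t : Int) = tiersRef levels t := by
  unfold split_into_tiers_alt
  rw [Int.toNat_natCast, loopB_eq]
  simp

-- ===== VERDICT (by name: the statement is the Claim_ definition above) =====
theorem split_into_tiers_spec : Claim_equal_split_into_tiers := by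
  intro levels t _ hpre
  unfold Spec_split_into_tiers
  rcases lt_trichotomy t 0 with hlt | h0 | hgt
  · show (List.foldl _ ([], 0) (PySem.List.pyRange 0 t 1)).1
        = (loopB levels [] t.toNat).reverse
    rw [PySem.List.pyRange_one_eq_nil (by omega)]
    have : t.toNat = 0 := by omega
    rw [this]
    rfl
  · exact absurd h0 hpre
  · have ht : t = ((t.toNat : ℕ) : Int) := (Int.toNat_of_nonneg (le_of_lt hgt)).symm
    rw [ht, A_eq_ref, B_eq_ref]

@[simp] theorem split_into_tiers_raises : Claim_raises_split_into_tiers := by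
  unfold Claim_raises_split_into_tiers
  exact ⟨fun _ _ _ h => by simpa [Pre_split_into_tiers] using h, by decide⟩
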